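-- pv_equiv track=rewrite | github.com/AbstractEndeavors/python-react-console | progress_bar_manager.py | get_dots
-- ===== SOURCE A (Python) =====
-- def get_dots(text):
--     i=0
--     dots=''
--     for char in text:
--         i+=1
--         if text[-i] !='.':
--             break
--         dots +=text[-i]
--     if len(dots) != 3:
--         text+='.'
--     else:
--         text = text[:-3]
--     return text
-- ===== SOURCE B (Python) =====
-- def get_dots(text):
--     if text.endswith('...') and not text.endswith('....'):
--         return text[:-3]
--     return text + '.'
-- ===== Notes on version B (the rewrite author's own statement) =====
-- stated objective: idiomatic
-- what changed: Replaces A's manual backwards-counting loop (index arithmetic with negative indexing and break) by two direct endswith suffix tests that capture the exactly-three-trailing-dots case.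
import Mathlib
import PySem

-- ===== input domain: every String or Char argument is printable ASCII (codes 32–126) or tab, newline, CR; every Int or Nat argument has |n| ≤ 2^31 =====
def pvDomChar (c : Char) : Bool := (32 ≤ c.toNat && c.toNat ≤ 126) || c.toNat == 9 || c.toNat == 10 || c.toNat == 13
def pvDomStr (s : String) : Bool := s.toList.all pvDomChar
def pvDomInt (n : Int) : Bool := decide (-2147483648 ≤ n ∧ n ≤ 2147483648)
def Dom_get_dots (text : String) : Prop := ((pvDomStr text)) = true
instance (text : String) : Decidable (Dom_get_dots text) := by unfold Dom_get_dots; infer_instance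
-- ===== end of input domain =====

-- B replaces A's manual backwards-counting loop with two direct endswith suffix tests (idiomatic; same cost).

-- ===== PORT A =====
-- the for-loop of A: walks the chars of `text` (only to bound the iteration count),
-- keeps the counter i and the accumulated `dots`; `text[-i]` is pyGet? with a negative index.
def getDotsLoop (cs : List Char) (rem : List Char) (i : Int) (dots : List Char) : List Char :=
  match rem with
  | [] => dots
  | _ :: rest =>
    let i' := i + 1
    match PySem.List.pyGet? cs (-i') with
    | none => dots
    | some c => if c ≠ '.' then dots else getDotsLoop cs rest i' (dots ++ [c])

def get_dots (text : String) : String :=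
  let dots := getDotsLoop text.toList text.toList 0 []
  if dots.length ≠ 3 then String.ofList (text.toList ++ ['.'])  -- text += '.'
  else PySem.Str.slice text none (some (-3))                    -- text[:-3]

-- ===== PORT B =====
def get_dots_alt (text : String) : String :=
  if PySem.Str.endswith text "..." && !(PySem.Str.endswith text "....") then
    PySem.Str.slice text none (some (-3))
  else String.ofList (text.toList ++ ['.'])

-- ===== PRECONDITION & SPEC =====
def Spec_get_dots (text : String) (out : String) : Prop := out = get_dots_alt text
instance (text : String) (out : String) : Decidable (Spec_get_dots text out) := by unfold Spec_get_dots; infer_instance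

-- ===== CLAIM (what is proved, stated in full; the proofs are below) =====
def Claim_equal_get_dots : Prop := ∀ (text : String), Dom_get_dots text → Spec_get_dots text (get_dots text)

-- ===== LEMMAS AND PROOFS =====

-- The loop collects exactly the maximal run of '.' at the end of cs (read back-to-front).
lemma getDotsLoop_spec (cs : List Char) :
    ∀ (rem : List Char) (i : Nat) (dots : List Char), i + rem.length = cs.length →
      getDotsLoop cs rem (i : Int) dots = dots ++ (cs.reverse.drop i).takeWhile (· == '.') := by
  intro rem
  induction rem with
  | nil =>
    intro i dots h
    simp at h
    simp [getDotsLoop, List.drop_of_length_le, h.symm.le]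
  | cons x rest ih =>
    intro i dots h
    have hi : i < cs.length := by simp at h; omega
    have hget : PySem.List.pyGet? cs (-((i : Int) + 1)) = cs.reverse[i]? := by
      have h1 : (0:Nat) < i + 1 := by omega
      have h2 : i + 1 ≤ cs.length := by omega
      have := PySem.List.pyGet?_neg_natCast cs (k := i + 1) (by exact_mod_cast h1) h2
      rw [show -((i:Int)+1) = -((i+1 : Nat) : Int) by push_cast; ring, this,
        List.getElem?_reverse (by simpa using hi)]
      congr 1
      omega
    have hrev : i < cs.reverse.length := by simpa using hi
    have hdrop : cs.reverse.drop i = cs.reverse[i] :: cs.reverse.drop (i + 1) :=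
      List.drop_eq_getElem_cons hrev
    rw [getDotsLoop]
    simp only [hget, List.getElem?_eq_getElem hrev]
    generalize hcg : cs.reverse[i] = c at hdrop ⊢
    by_cases hc : c = '.'
    · have := ih (i + 1) (dots ++ [c]) (by simp at h ⊢; omega)
      rw [if_neg (by simp [hc]), show (i : Int) + 1 = ((i + 1 : Nat) : Int) by push_cast; ring,
        this, hdrop, List.takeWhile_cons, if_pos (by simp [hc])]
      simp [hc]
    · rw [if_pos (by simp [hc]), hdrop, List.takeWhile_cons, if_neg (by simp [hc])]
      simp

-- replicate k '.' is a prefix of l iff the leading '.'-run of l has length ≥ k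
lemma replicate_prefix_iff (l : List Char) (k : Nat) :
    (List.replicate k '.' <+: l) ↔ k ≤ (l.takeWhile (· == '.')).length := by
  induction l generalizing k with
  | nil => cases k <;> simp
  | cons c t ih =>
    cases k with
    | zero => simp
    | succ k =>
      by_cases hc : c = '.'
      · subst hc
        simp [List.replicate_succ, List.cons_prefix_cons, ih]
      · simp [List.replicate_succ, List.cons_prefix_cons, hc, Ne.symm hc]

lemma endswith_run (text : String) (k : Nat) (p : String) (hp : p.toList = List.replicate k '.') :
    PySem.Str.endswith text p = true ↔ k ≤ (text.toList.reverse.takeWhile (· == '.')).length := by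
  rw [PySem.Str.endswith_eq, show PySem.Chars.endswith text.toList p.toList
      = p.toList.isSuffixOf text.toList from rfl,
    List.isSuffixOf_iff_suffix, ← List.reverse_prefix, hp, List.reverse_replicate,
    replicate_prefix_iff]

-- ===== VERDICT (by name: the statement is the Claim_ definition above) =====
theorem get_dots_spec : Claim_equal_get_dots := by
  intro text _
  unfold Spec_get_dots get_dots get_dots_alt
  have hloop := getDotsLoop_spec text.toList text.toList 0 [] (by simp)
  rw [show ((0:Nat):Int) = 0 from rfl] at hloop
  rw [hloop]
  simp only [List.nil_append, List.drop_zero]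
  have h3 := endswith_run text 3 "..." (by decide)
  have h4 := endswith_run text 4 "...." (by decide)
  set T := text.toList.reverse.takeWhile (· == '.') with hT
  have hcond : (PySem.Str.endswith text "..." && !(PySem.Str.endswith text "....")) = true
      ↔ T.length = 3 := by
    constructor
    · intro hx
      simp only [Bool.and_eq_true, Bool.not_eq_true'] at hx
      obtain ⟨ha, hb⟩ := hx
      have h3' := h3.mp ha
      have h4' : ¬ (4 ≤ T.length) := fun hk => by rw [h4.mpr hk] at hb; cases hb
      omega
    · intro hx
      have h4' : PySem.Str.endswith text "...." = false := by
        rcases Bool.eq_false_or_eq_true (PySem.Str.endswith text "....") with h | h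
        · exact absurd (h4.mp h) (by rw [hx]; omega)
        · exact h
      rw [h3.mpr (by rw [hx]), h4']
      rfl
  by_cases hlen : T.length = 3
  · rw [if_neg (by simp only [← hT]; omega), if_pos (hcond.mpr hlen)]
  · rw [if_pos (by simp only [← hT]; exact hlen), if_neg (fun hx => hlen (hcond.mp hx))]
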